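-- pv_equiv track=rewrite | github.com/MrBrantCode/unitest_baseline | mut_generate/mist_train_taco/taco_14562/solution.py | calculate_minimum_cost
-- ===== SOURCE A (Python) =====
-- def calculate_minimum_cost(W: int, H: int, enemies: list) -> int:
--     """
--     Calculate the minimum cost BomBom consumes before it destroys all enemy characters on the board.
--
--     Parameters:
--     - W (int): The number of squares in the horizontal direction (width of the board).
--     - H (int): The number of squares in the vertical direction (height of the board).
--     - enemies (list): A list of tuples where each tuple contains the coordinates (x, y) of an enemy character.
--
--     Returns:
--     - int: The minimum cost BomBom consumes.
--     """
--     n = len(enemies)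
--     if n == 0:
--         return 0
--
--     # Sort enemies by their x-coordinate
--     enemies.sort()
--
--     # Calculate the maximum y-coordinate for enemies from the end to the start
--     y_max = [0]
--     for _, y in reversed(enemies):
--         y_max.append(max(y_max[-1], y))
--
--     # Extract x-coordinates of enemies and add the starting point (0, 0)
--     xs = [0] + [x for x, _ in enemies]
--
--     # Calculate the minimum cost
--     min_cost = min([xs[i] + y_max[n - i] for i in range(n + 1)])
--
--     return min_cost
-- ===== SOURCE B (Python) =====
-- def calculate_minimum_cost(W: int, H: int, enemies: list) -> int:
--     # Sort-free alternative: the optimal strategy clears some column x (or none)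
--     # plus every row up to the tallest enemy strictly right of that column.
--     # Try each enemy's column as the cleared column, scanning the unsorted list
--     # pairwise; no sorting, no auxiliary arrays.  (Unlike A, does not sort
--     # `enemies` in place.)
--     if not enemies:
--         return 0
--     top = 0                       # tallest enemy row overall (floor 0)
--     for _, y in enemies:
--         if y > top:
--             top = y
--     best = top                    # clear no column, every occupied row
--     for x, _ in enemies:
--         tall = 0                  # tallest enemy strictly right of column x
--         for xx, yy in enemies:
--             if xx > x and yy > tall:
--                 tall = yy
--         cand = x + tall
--         if cand < best:
--             best = cand
--     return best
-- ===== Notes on version B (the rewrite author's own statement) =====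
-- stated objective: alternative
-- what changed: B drops A's sort and split-point scan entirely: it treats each enemy's column as the candidate cleared column and finds the tallest enemy strictly to its right by a pairwise scan of the unsorted list (O(n^2)), instead of sorting and minimizing x + suffix-max(y) over split positions; B also does not mutate enemies in place.
import Mathlib
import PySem

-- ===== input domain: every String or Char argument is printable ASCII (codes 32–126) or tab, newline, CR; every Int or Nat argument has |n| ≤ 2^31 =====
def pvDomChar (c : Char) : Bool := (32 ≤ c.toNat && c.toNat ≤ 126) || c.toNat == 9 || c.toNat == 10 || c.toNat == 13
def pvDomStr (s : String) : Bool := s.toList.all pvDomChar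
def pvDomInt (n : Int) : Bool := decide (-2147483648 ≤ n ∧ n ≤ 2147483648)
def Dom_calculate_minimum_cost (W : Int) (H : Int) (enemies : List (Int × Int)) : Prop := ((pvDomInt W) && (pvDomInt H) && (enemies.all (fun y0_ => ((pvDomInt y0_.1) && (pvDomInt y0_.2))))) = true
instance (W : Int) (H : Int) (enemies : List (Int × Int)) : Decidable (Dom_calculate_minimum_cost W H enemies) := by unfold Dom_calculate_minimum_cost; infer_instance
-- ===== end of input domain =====

-- B drops A's sort + split-point scan in favour of a sort-free pairwise scan (objective:
-- alternative).  A sorts `enemies` in place; B does not mutate it — the equivalence proved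
-- here is about the return value only.

-- ===== PORT A =====
-- loop body of A's y_max construction: y_max.append(max(y_max[-1], y))
def pvStepA (acc : List Int) (e : Int × Int) : List Int :=
  acc ++ [max (PySem.List.pyGetD acc (-1) 0) e.2]

def calculate_minimum_cost (W : Int) (H : Int) (enemies : List (Int × Int)) : Int :=
  let n : Nat := enemies.length
  if n = 0 then 0
  else
    let s := PySem.List.sorted2 enemies Prod.fst Prod.snd
    let y_max : List Int := s.reverse.foldl pvStepA [0]
    let xs : List Int := 0 :: s.map Prod.fst
    let cands : List Int := (PySem.List.pyRange 0 ((n : Int) + 1) 1).map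
      (fun i => PySem.List.pyGetD xs i 0 + PySem.List.pyGetD y_max ((n : Int) - i) 0)
    match PySem.List.min? cands (fun v => v) with
    | some m => m
    | none => 0

-- ===== PORT B =====
-- Source B's inner loop: tallest enemy strictly right of column x (running max, floor 0)
def pvTall (enemies : List (Int × Int)) (x : Int) : Int :=
  enemies.foldl (fun t e => if e.1 > x ∧ e.2 > t then e.2 else t) 0

-- Source B's first loop: tallest enemy row overall (running max, floor 0)
def pvTop (enemies : List (Int × Int)) : Int :=
  enemies.foldl (fun t e => if e.2 > t then e.2 else t) 0

def calculate_minimum_cost_alt (W : Int) (H : Int) (enemies : List (Int × Int)) : Int :=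
  if enemies.isEmpty then 0
  else
    enemies.foldl
      (fun best e =>
        let cand := e.1 + pvTall enemies e.1
        if cand < best then cand else best)
      (pvTop enemies)

-- ===== PRECONDITION & SPEC =====
def Spec_calculate_minimum_cost (W : Int) (H : Int) (enemies : List (Int × Int)) (out : Int) : Prop := out = calculate_minimum_cost_alt W H enemies
instance (W : Int) (H : Int) (enemies : List (Int × Int)) (out : Int) : Decidable (Spec_calculate_minimum_cost W H enemies out) := by unfold Spec_calculate_minimum_cost; infer_instance

-- ===== CLAIM (what is proved, stated in full; the proofs are below) =====
def Claim_equal_calculate_minimum_cost : Prop := ∀ (W : Int) (H : Int) (enemies : List (Int × Int)), Dom_calculate_minimum_cost W H enemies → Spec_calculate_minimum_cost W H enemies (calculate_minimum_cost W H enemies)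

-- ===== LEMMAS AND PROOFS =====

-- suffix maximum with floor 0 (A's y_max values, B's `top`)
def pvM : List (Int × Int) → Int
  | [] => 0
  | e :: t => max (pvM t) e.2

-- max y over enemies with x-coordinate strictly greater than v, floor 0 (B's `tall`)
def pvMgt : List (Int × Int) → Int → Int
  | [], _ => 0
  | e :: t, v => if e.1 > v then max (pvMgt t v) e.2 else pvMgt t v

-- A's candidate values for split points i = 1 .. n
def pvGo : List (Int × Int) → List Int
  | [] => []
  | e :: t => (e.1 + pvM t) :: pvGo t

theorem pvM_nonneg (l : List (Int × Int)) : 0 ≤ pvM l := by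
  induction l with
  | nil => simp [pvM]
  | cons e t ih => simp only [pvM]; omega

theorem pvMgt_nonneg (l : List (Int × Int)) (v : Int) : 0 ≤ pvMgt l v := by
  induction l with
  | nil => simp [pvMgt]
  | cons e t ih => simp only [pvMgt]; split_ifs <;> omega

theorem pvTall_foldl (v : Int) (l : List (Int × Int)) :
    ∀ a : Int, 0 ≤ a →
      l.foldl (fun t e => if e.1 > v ∧ e.2 > t then e.2 else t) a = max a (pvMgt l v) := by
  induction l with
  | nil => intro a ha; simp [pvMgt]; omega
  | cons e t ih =>
    intro a ha
    simp only [List.foldl_cons]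
    have hstep : 0 ≤ (if e.1 > v ∧ e.2 > a then e.2 else a) := by split_ifs <;> omega
    rw [ih _ hstep]
    have := pvMgt_nonneg t v
    simp only [pvMgt]
    split_ifs <;> omega

theorem pvTall_eq (l : List (Int × Int)) (v : Int) : pvTall l v = pvMgt l v := by
  rw [pvTall, pvTall_foldl v l 0 le_rfl]
  have := pvMgt_nonneg l v
  omega

theorem pvTop_foldl (l : List (Int × Int)) :
    ∀ a : Int, 0 ≤ a →
      l.foldl (fun t e => if e.2 > t then e.2 else t) a = max a (pvM l) := by
  induction l with
  | nil => intro a ha; simp [pvM]; omega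
  | cons e t ih =>
    intro a ha
    simp only [List.foldl_cons]
    have hstep : 0 ≤ (if e.2 > a then e.2 else a) := by split_ifs <;> omega
    rw [ih _ hstep]
    have := pvM_nonneg t
    simp only [pvM]
    omega

theorem pvTop_eq (l : List (Int × Int)) : pvTop l = pvM l := by
  rw [pvTop, pvTop_foldl l 0 le_rfl]
  have := pvM_nonneg l
  omega

theorem pvM_perm {l₁ l₂ : List (Int × Int)} (h : l₁.Perm l₂) : pvM l₁ = pvM l₂ := by
  induction h with
  | nil => rfl
  | cons e _ ih => simp [pvM, ih]
  | swap x y t => simp only [pvM]; omega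
  | trans _ _ ih1 ih2 => exact ih1.trans ih2

theorem pvMgt_perm {l₁ l₂ : List (Int × Int)} (h : l₁.Perm l₂) (v : Int) :
    pvMgt l₁ v = pvMgt l₂ v := by
  induction h with
  | nil => rfl
  | cons e _ ih => simp [pvMgt, ih]
  | swap x y t => simp only [pvMgt]; split_ifs <;> omega
  | trans _ _ ih1 ih2 => exact ih1.trans ih2

theorem pvFoldMin_perm (f : Int × Int → Int) {l₁ l₂ : List (Int × Int)} (h : l₁.Perm l₂) :
    ∀ a : Int, l₁.foldl (fun b e => min b (f e)) a = l₂.foldl (fun b e => min b (f e)) a := by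
  induction h with
  | nil => intro a; rfl
  | cons e _ ih => intro a; simp only [List.foldl_cons]; exact ih _
  | swap x y t =>
    intro a
    simp only [List.foldl_cons]
    have : min (min a (f y)) (f x) = min (min a (f x)) (f y) := by omega
    rw [this]
  | trans _ _ ih1 ih2 => intro a; exact (ih1 a).trans (ih2 a)

theorem pvMgt_eq_pvM (t : List (Int × Int)) (v : Int) (h : ∀ e ∈ t, v < e.1) :
    pvMgt t v = pvM t := by
  induction t with
  | nil => rfl
  | cons f u ih =>
    have hf : v < f.1 := h f (by simp)
    simp only [pvMgt, pvM, if_pos hf, ih (fun e he => h e (by simp [he]))]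

-- A's in-place y_max construction (pvStepA) — last element and k-th element
theorem pvYmax_last (s : List (Int × Int)) :
    PySem.List.pyGetD (s.reverse.foldl pvStepA [0]) (-1) 0 = pvM s := by
  induction s with
  | nil => decide
  | cons e t ih =>
    rw [List.reverse_cons, List.foldl_append]
    simp only [List.foldl_cons, List.foldl_nil, pvStepA, ih]
    rw [PySem.List.pyGetD_neg_one_append_singleton]
    rfl

theorem pvYmax_cons (e : Int × Int) (t : List (Int × Int)) :
    (e :: t).reverse.foldl pvStepA [0] = t.reverse.foldl pvStepA [0] ++ [pvM (e :: t)] := by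
  rw [List.reverse_cons, List.foldl_append]
  simp only [List.foldl_cons, List.foldl_nil, pvStepA, pvYmax_last]
  rfl

theorem pvYmax_length (s : List (Int × Int)) :
    (s.reverse.foldl pvStepA [0]).length = s.length + 1 := by
  induction s with
  | nil => rfl
  | cons e t ih => rw [pvYmax_cons, List.length_append, ih]; simp

theorem pvYmax_get (s : List (Int × Int)) (k : Nat) (hk : k ≤ s.length) :
    PySem.List.pyGetD (s.reverse.foldl pvStepA [0]) ((k : Int)) 0
      = pvM (s.drop (s.length - k)) := by
  induction s generalizing k with
  | nil =>
    have hk0 : k = 0 := by simpa using hk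
    subst hk0; decide
  | cons e t ih =>
    rw [pvYmax_cons, PySem.List.pyGetD_natCast, List.getD_eq_getElem?_getD]
    by_cases hk2 : k ≤ t.length
    · rw [List.getElem?_append_left (by rw [pvYmax_length]; omega)]
      rw [← List.getD_eq_getElem?_getD, ← PySem.List.pyGetD_natCast, ih k hk2]
      have h3 : (e :: t).length - k = (t.length - k) + 1 := by
        simp only [List.length_cons]; omega
      rw [h3, List.drop_succ_cons]
    · have hk3 : k = t.length + 1 := by simp only [List.length_cons] at hk; omega
      subst hk3
      rw [List.getElem?_append_right (by rw [pvYmax_length])]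
      rw [pvYmax_length]
      simp only [Nat.sub_self, List.getElem?_cons_zero, Option.getD_some]
      have h4 : (e :: t).length - (t.length + 1) = 0 := by
        simp only [List.length_cons]; omega
      rw [h4, List.drop_zero]

theorem pvGo_length (s : List (Int × Int)) : (pvGo s).length = s.length := by
  induction s with
  | nil => rfl
  | cons e t ih => simp [pvGo, ih]

theorem pvGo_getElem (s : List (Int × Int)) (j : Nat) (h : j < s.length)
    (h2 : j < (pvGo s).length) : (pvGo s)[j] = (s[j]).1 + pvM (s.drop (j + 1)) := by
  induction s generalizing j with
  | nil => simp at h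
  | cons e t ih =>
    cases j with
    | zero => simp [pvGo]
    | succ j => simp only [pvGo, List.getElem_cons_succ, List.drop_succ_cons]
                exact ih j (by simp only [List.length_cons] at h; omega)
                  (by rw [pvGo_length]; simp only [List.length_cons] at h; omega)

theorem pvCands_eq (s : List (Int × Int)) :
    ((PySem.List.pyRange 0 ((s.length : Int) + 1) 1).map
      (fun i => PySem.List.pyGetD (0 :: s.map Prod.fst) i 0
        + PySem.List.pyGetD (s.reverse.foldl pvStepA [0]) ((s.length : Int) - i) 0))
      = pvM s :: pvGo s := by
  have hr : PySem.List.pyRange 0 ((s.length : Int) + 1) 1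
      = (List.range (s.length + 1)).map (fun k : Nat => ((k : Nat) : Int)) := by
    rw [PySem.List.pyRange_one]
    have h0 : (((s.length : Int) + 1) - 0).toNat = s.length + 1 := by omega
    rw [h0]
    exact List.map_congr_left (fun k _ => by omega)
  rw [hr, List.map_map]
  apply List.ext_getElem
  · simp [pvGo_length]
  · intro i h1 h2
    simp only [List.getElem_map, List.getElem_range, Function.comp_apply]
    have hi : i < s.length + 1 := by simpa using h1
    have hsub : (s.length : Int) - (i : Int) = ((s.length - i : Nat) : Int) := by omega
    rw [hsub, pvYmax_get s (s.length - i) (by omega)]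
    have hdd : s.length - (s.length - i) = i := by omega
    rw [hdd]
    cases i with
    | zero => simp
    | succ j =>
      have hj : j < s.length := by omega
      rw [PySem.List.pyGetD_natCast]
      simp only [List.getElem_cons_succ, List.getD_eq_getElem?_getD, List.getElem?_cons_succ,
        List.getElem?_map]
      rw [List.getElem?_eq_getElem hj]
      simp only [Option.map_some, Option.getD_some]
      rw [pvGo_getElem s j hj (by rw [pvGo_length]; exact hj)]

-- the sorted2 call is sorting by the lexicographic key  e ↦ toLex (e.1, e.2)
theorem pvSorted2_eq (xs : List (Int × Int)) :
    PySem.List.sorted2 xs Prod.fst Prod.snd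
      = PySem.List.sorted xs (fun e => toLex (e.1, e.2)) := by
  unfold PySem.List.sorted2 PySem.List.sorted
  have hb : (fun (a b : Int × Int) =>
        decide (a.1 < b.1) || (!decide (b.1 < a.1) && decide (a.2 < b.2)))
      = (fun (a b : Int × Int) =>
        decide ((toLex (a.1, a.2) : Lex (Int × Int)) < toLex (b.1, b.2))) := by
    funext a b
    by_cases h1 : a.1 < b.1 <;> by_cases h2 : b.1 < a.1 <;> by_cases h3 : a.2 < b.2 <;>
      simp [h1, h2, h3, Prod.Lex.toLex_lt_toLex] <;> omega
  simp only [if_neg (by decide : ¬ (false = true)), hb]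

theorem pvSorted_pairwise_fst (xs : List (Int × Int)) :
    (PySem.List.sorted2 xs Prod.fst Prod.snd).Pairwise (fun a b => a.1 ≤ b.1) := by
  rw [pvSorted2_eq]
  refine (PySem.List.sorted_pairwise xs (fun e => toLex (e.1, e.2))).imp ?_
  intro a b h
  rcases Prod.Lex.toLex_le_toLex.mp h with h' | h' <;> simp at h' <;> omega

theorem pvMgt_cons_le' (e : Int × Int) (t : List (Int × Int)) (v : Int) (h : e.1 ≤ v) :
    pvMgt (e :: t) v = pvMgt t v := by
  simp only [pvMgt]
  rw [if_neg (by omega)]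

-- key step: with v ≤ every x of a sorted t, replacing the full suffix max pvM t by the
-- strictly-greater max pvMgt t v in the candidate v + … does not change the running min,
-- because v + pvMgt t v is v + pvM of a later suffix, already represented in pvGo t
theorem pvH (t : List (Int × Int)) (ht : t.Pairwise (fun a b => a.1 ≤ b.1))
    (v : Int) (hv : ∀ e ∈ t, v ≤ e.1) (a : Int) :
    (pvGo t).foldl min (min a (v + pvM t)) = (pvGo t).foldl min (min a (v + pvMgt t v)) := by
  induction t generalizing a with
  | nil => simp [pvM, pvMgt]
  | cons f u ih =>
    rcases List.pairwise_cons.mp ht with ⟨hf, hu⟩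
    by_cases hx : v < f.1
    · have hall : ∀ e ∈ f :: u, v < e.1 := by
        intro e he
        rcases List.mem_cons.mp he with rfl | he
        · exact hx
        · exact lt_of_lt_of_le hx (hf e he)
      rw [pvMgt_eq_pvM _ _ hall]
    · have hfv : f.1 = v := le_antisymm (by omega) (hv f (by simp))
      have hvu : ∀ e ∈ u, v ≤ e.1 := by
        intro e he; exact hv e (by simp [he])
      simp only [pvGo, pvM, List.foldl_cons]
      rw [pvMgt_cons_le' f u v (by omega)]
      have e1 : min (min a (v + max (pvM u) f.2)) (f.1 + pvM u) = min a (v + pvM u) := by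
        omega
      have e2 : min (min a (v + pvMgt u v)) (f.1 + pvM u)
          = min (min a (v + pvMgt u v)) (v + pvM u) := by omega
      rw [e1, e2, ih hu hvu a, ih hu hvu (min a (v + pvMgt u v))]
      have e3 : min (min a (v + pvMgt u v)) (v + pvMgt u v) = min a (v + pvMgt u v) := by
        omega
      rw [e3]

theorem pvG (s : List (Int × Int)) (hs : s.Pairwise (fun a b => a.1 ≤ b.1)) (a : Int) :
    (pvGo s).foldl min a = s.foldl (fun b e => min b (e.1 + pvMgt s e.1)) a := by
  induction s generalizing a with
  | nil => rfl
  | cons e t ih =>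
    rcases List.pairwise_cons.mp hs with ⟨he, htp⟩
    simp only [pvGo, List.foldl_cons]
    have h1 : pvMgt (e :: t) e.1 = pvMgt t e.1 := pvMgt_cons_le' e t e.1 le_rfl
    rw [pvH t htp e.1 he a, ih htp, h1]
    apply PySem.List.foldl_congr_mem
    intro acc x hx
    rw [pvMgt_cons_le' e t x.1 (he x hx)]

-- ===== VERDICT (by name: the statement is the Claim_ definition above) =====
theorem calculate_minimum_cost_spec : Claim_equal_calculate_minimum_cost := by
  intro W H enemies _
  unfold Spec_calculate_minimum_cost calculate_minimum_cost calculate_minimum_cost_alt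
  by_cases hne : enemies = []
  · subst hne; simp
  · have hnz : ¬ enemies.length = 0 := by simpa using hne
    simp only [hnz, List.isEmpty_iff, hne, if_false]
    have hperm : (PySem.List.sorted2 enemies Prod.fst Prod.snd).Perm enemies :=
      PySem.List.sorted2_perm enemies Prod.fst Prod.snd false
    have hlen : (PySem.List.sorted2 enemies Prod.fst Prod.snd).length = enemies.length :=
      hperm.length_eq
    set s := PySem.List.sorted2 enemies Prod.fst Prod.snd with hs
    rw [← hlen, pvCands_eq s, PySem.List.min?_id_cons]
    have hb1 : enemies.foldl
        (fun best e => let cand := e.1 + pvTall enemies e.1;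
          if cand < best then cand else best) (pvTop enemies)
        = enemies.foldl (fun b e => min b (e.1 + pvMgt enemies e.1)) (pvM enemies) := by
      rw [pvTop_eq]
      apply PySem.List.foldl_congr_mem
      intro acc x _
      rw [pvTall_eq]
      simp only []
      split_ifs <;> omega
    rw [hb1, pvFoldMin_perm (fun e => e.1 + pvMgt enemies e.1) hperm.symm (pvM enemies)]
    have hmgt : ∀ acc (x : Int × Int), x ∈ s →
        min acc (x.1 + pvMgt enemies x.1) = min acc (x.1 + pvMgt s x.1) := by
      intro acc x _
      rw [pvMgt_perm hperm.symm]
    rw [PySem.List.foldl_congr_mem s _ _ _ hmgt, pvM_perm hperm.symm,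
      ← pvG s (pvSorted_pairwise_fst enemies)]
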